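-- pv_equiv track=rewrite | github.com/Mohammad-Adilkhan3/gfg | array_pair_sum_divisiblity.py | canPair
-- ===== SOURCE A (Python) =====
-- def canPair(nums, k):
--     if len(nums) % 2 != 0:
--         return False
--
--     remainder_count = {}
--
--     for num in nums:
--         remainder = num % k
--         if remainder in remainder_count:
--             remainder_count[remainder] += 1
--         else:
--             remainder_count[remainder] = 1
--
--     for remainder, count in remainder_count.items():
--         if remainder == 0:
--             if count % 2 != 0:
--                 return False
--         elif k - remainder in remainder_count:
--             if remainder_count[remainder] != remainder_count[k - remainder]:
--                 return False
--         else: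
--             return False
--
--     return True
-- ===== SOURCE B (Python) =====
-- def canPair(nums, k):
--     # multiset view: pairs (r, k-r) match up iff the residue multiset equals
--     # the multiset of negated residues; residue-0 elements must pair among themselves.
--     if len(nums) % 2 != 0:
--         return False
--     if sorted(x % k for x in nums) != sorted((-x) % k for x in nums):
--         return False
--     return sum(1 for x in nums if x % k == 0) % 2 == 0
-- ===== Notes on version B (the rewrite author's own statement) =====
-- stated objective: alternative
-- what changed: Replaces A's residue-count dict and its pairwise cross-lookup scan by a multiset comparison: B sorts the residues and the negated residues and compares the two lists, plus one parity count for residue 0.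
import Mathlib
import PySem

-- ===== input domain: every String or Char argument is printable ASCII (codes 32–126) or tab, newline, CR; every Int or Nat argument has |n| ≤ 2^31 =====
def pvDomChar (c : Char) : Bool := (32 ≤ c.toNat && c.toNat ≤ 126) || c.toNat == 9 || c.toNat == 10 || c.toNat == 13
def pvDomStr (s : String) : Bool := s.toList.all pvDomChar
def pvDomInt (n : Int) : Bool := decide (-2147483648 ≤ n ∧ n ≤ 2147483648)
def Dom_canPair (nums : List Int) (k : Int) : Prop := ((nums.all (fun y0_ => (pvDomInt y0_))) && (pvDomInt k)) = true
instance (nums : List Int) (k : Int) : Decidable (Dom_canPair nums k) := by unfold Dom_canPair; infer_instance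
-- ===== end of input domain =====

-- B replaces A's residue-count dict and cross-lookup scan by comparing the sorted residue
-- multiset with the sorted negated-residue multiset (objective: alternative algorithm).

-- ===== PORT A =====
def canPair (nums : List Int) (k : Int) : Bool :=
  if nums.length % 2 ≠ 0 then false
  else
    -- build remainder_count
    let d : PySem.Dict Int Int := nums.foldl (fun d num =>
      let r := PySem.Int.mod num k
      if d.contains r then d.modify r 0 (· + 1) else d.insert r 1) PySem.Dict.empty
    -- loop over items with early `return False` = all items pass
    d.items.all (fun rc =>
      if rc.1 = 0 then PySem.Int.mod rc.2 2 == 0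
      else if d.contains (k - rc.1) then
        -- remainder_count[r] / remainder_count[k-r]: keys present, so d[x] = getD x 0
        d.getD rc.1 0 == d.getD (k - rc.1) 0
      else false)

-- ===== PORT B =====
def canPair_alt (nums : List Int) (k : Int) : Bool :=
  if nums.length % 2 ≠ 0 then false
  else if PySem.List.sorted (nums.map (fun x => PySem.Int.mod x k)) (fun x => x) false ≠
          PySem.List.sorted (nums.map (fun x => PySem.Int.mod (-x) k)) (fun x => x) false then false
  else PySem.Int.mod ((nums.countP (fun x => PySem.Int.mod x k == 0) : Int)) 2 == 0

-- ===== PRECONDITION & SPEC =====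
-- A (and B) raise ZeroDivisionError exactly when k = 0 and nums is nonempty of even length
-- (with odd length or [] the answer is decided before any '%'): those inputs are excluded.
def Pre_canPair (nums : List Int) (k : Int) : Prop :=
  k ≠ 0 ∨ nums = [] ∨ nums.length % 2 = 1
instance (nums : List Int) (k : Int) : Decidable (Pre_canPair nums k) := by
  unfold Pre_canPair; infer_instance

def pvWitness_canPair : List Int × Int := ([2, 4, 5, 1], 3)

def Spec_canPair (nums : List Int) (k : Int) (out : Bool) : Prop := out = canPair_alt nums k
instance (nums : List Int) (k : Int) (out : Bool) : Decidable (Spec_canPair nums k out) := by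
  unfold Spec_canPair; infer_instance

-- ===== CLAIM (what is proved, stated in full; the proofs are below) =====
def Claim_equal_canPair : Prop := ∀ (nums : List Int) (k : Int), Dom_canPair nums k → Pre_canPair nums k → Spec_canPair nums k (canPair nums k)

-- ===== LEMMAS AND PROOFS =====

-- mod a k is the unique representative of a's class in Python's remainder window
theorem pvModUnique (k a r : Int) (h : k ∣ a - r)
    (hw : (0 ≤ r ∧ r < k) ∨ (k < r ∧ r ≤ 0)) : PySem.Int.mod a k = r := by
  have h1 := PySem.Int.floordiv_mul_add_mod a k
  have h2 : k ∣ PySem.Int.mod a k - r := by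
    have : PySem.Int.mod a k - r = (a - r) - PySem.Int.floordiv a k * k := by linarith
    rw [this]
    exact dvd_sub h ⟨PySem.Int.floordiv a k, by ring⟩
  have hb : (0 ≤ PySem.Int.mod a k ∧ PySem.Int.mod a k < k) ∨
      (k < PySem.Int.mod a k ∧ PySem.Int.mod a k ≤ 0) := by
    rcases hw with hw | hw
    · exact Or.inl ⟨PySem.Int.mod_nonneg a (by omega), PySem.Int.mod_lt a (by omega)⟩
    · exact Or.inr (PySem.Int.mod_neg_bounds a (by omega))
  have habs : |PySem.Int.mod a k - r| < |k| := by
    rw [abs_lt]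
    rcases abs_cases k with ⟨he, hp⟩ | ⟨he, hp⟩ <;> rw [he] <;>
      rcases hw with hw | hw <;> rcases hb with hb | hb <;> omega
  have : PySem.Int.mod a k - r = 0 :=
    Int.eq_zero_of_abs_lt_dvd ((abs_dvd _ _).mpr h2) habs
  omega

theorem pvModWin (k a : Int) (hk : k ≠ 0) :
    (0 ≤ PySem.Int.mod a k ∧ PySem.Int.mod a k < k) ∨
    (k < PySem.Int.mod a k ∧ PySem.Int.mod a k ≤ 0) := by
  rcases lt_or_gt_of_ne hk with h | h
  · exact Or.inr (PySem.Int.mod_neg_bounds a h)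
  · exact Or.inl ⟨PySem.Int.mod_nonneg a h, PySem.Int.mod_lt a h⟩

theorem pvModSelf (k r : Int) (hw : (0 ≤ r ∧ r < k) ∨ (k < r ∧ r ≤ 0)) :
    PySem.Int.mod r k = r :=
  pvModUnique k r r (by simp) hw

theorem pvModCong (k a b : Int) (hk : k ≠ 0) (h : k ∣ a - b) :
    PySem.Int.mod a k = PySem.Int.mod b k := by
  apply pvModUnique k a _ _ (pvModWin k b hk)
  have h2 : k ∣ b - PySem.Int.mod b k := by
    have h1 := PySem.Int.floordiv_mul_add_mod b k
    exact ⟨PySem.Int.floordiv b k, by linarith⟩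
  have : a - PySem.Int.mod b k = (a - b) + (b - PySem.Int.mod b k) := by ring
  rw [this]; exact dvd_add h h2

-- the residue pairing r ↦ (-r) % k
def pvInv (k r : Int) : Int := PySem.Int.mod (-r) k

theorem pvMod_fix (k a : Int) (hk : k ≠ 0) :
    PySem.Int.mod (PySem.Int.mod a k) k = PySem.Int.mod a k :=
  pvModSelf k _ (pvModWin k a hk)

theorem pvMod_zero (k : Int) (hk : k ≠ 0) : PySem.Int.mod 0 k = 0 := by
  apply pvModSelf; omega

theorem pvMod_neg (k x : Int) (hk : k ≠ 0) :
    PySem.Int.mod (-x) k = pvInv k (PySem.Int.mod x k) := by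
  apply pvModCong k _ _ hk
  have h1 := PySem.Int.floordiv_mul_add_mod x k
  exact ⟨-PySem.Int.floordiv x k, by linarith⟩

theorem pvInv_eq (k r : Int) (hk : k ≠ 0) (hr : PySem.Int.mod r k = r) (h0 : r ≠ 0) :
    pvInv k r = k - r := by
  have hw : (0 ≤ r ∧ r < k) ∨ (k < r ∧ r ≤ 0) := hr ▸ pvModWin k r hk
  apply pvModUnique k (-r) (k - r) ⟨-1, by ring⟩
  rcases hw with hw | hw
  · exact Or.inl (by omega)
  · exact Or.inr (by omega)

theorem pvInv_fix (k r : Int) (hk : k ≠ 0) :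
    PySem.Int.mod (pvInv k r) k = pvInv k r :=
  pvMod_fix k (-r) hk

theorem pvInv_invol (k r : Int) (hk : k ≠ 0) (hr : PySem.Int.mod r k = r) :
    pvInv k (pvInv k r) = r := by
  by_cases h0 : r = 0
  · subst h0
    have : pvInv k 0 = 0 := by simpa [pvInv] using pvMod_zero k hk
    rw [this, this]
  · have hw : (0 ≤ r ∧ r < k) ∨ (k < r ∧ r ≤ 0) := hr ▸ pvModWin k r hk
    rw [pvInv_eq k r hk hr h0,
        pvInv_eq k (k - r) hk (pvModSelf k _ (by rcases hw with hw | hw; exact Or.inl (by omega); exact Or.inr (by omega))) (by omega)]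
    ring

theorem pvCount_map_inv (k a : Int) (L : List Int) (hk : k ≠ 0)
    (HL : ∀ r ∈ L, PySem.Int.mod r k = r) (ha : PySem.Int.mod a k = a) :
    (L.map (pvInv k)).count a = L.count (pvInv k a) := by
  induction L with
  | nil => rfl
  | cons x t ih =>
    have hx : PySem.Int.mod x k = x := HL x List.mem_cons_self
    have hiff : (pvInv k x = a) ↔ (x = pvInv k a) := by
      constructor
      · intro h; rw [← h, pvInv_invol k x hk hx]
      · intro h; rw [h, pvInv_invol k a hk ha]
    simp only [List.map_cons, List.count_cons]
    rw [ih (fun r hr => HL r (List.mem_cons_of_mem _ hr))]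
    by_cases h : pvInv k x = a
    · simp [hiff.mp h, pvInv_invol k a hk ha]
    · have h2 : ¬ (x = pvInv k a) := fun hh => h (hiff.mpr hh)
      simp [h, h2]

theorem pvCount_nonfix (k a : Int) (L : List Int)
    (HL : ∀ r ∈ L, PySem.Int.mod r k = r) (ha : PySem.Int.mod a k ≠ a) :
    L.count a = 0 :=
  List.count_eq_zero.mpr fun h => ha (HL a h)

-- A's per-residue check over the support ↔ the multiset of residues is inv-symmetric
theorem pvMain (k : Int) (L : List Int) (hk : k ≠ 0)
    (HL : ∀ r ∈ L, PySem.Int.mod r k = r) :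
    (∀ r ∈ L, r ≠ 0 → ((k - r) ∈ L ∧ L.count r = L.count (k - r))) ↔
      L.Perm (L.map (pvInv k)) := by
  rw [List.perm_iff_count]
  constructor
  · intro H a
    by_cases hfix : PySem.Int.mod a k = a
    · rw [pvCount_map_inv k a L hk HL hfix]
      by_cases h0 : a = 0
      · subst h0
        have : pvInv k 0 = 0 := by simpa [pvInv] using pvMod_zero k hk
        rw [this]
      · rw [pvInv_eq k a hk hfix h0]
        by_cases hmem : a ∈ L
        · exact (H a hmem h0).2
        · rw [List.count_eq_zero.mpr hmem]
          by_contra hne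
          have hpos : 0 < L.count (k - a) := Nat.pos_of_ne_zero (fun h => hne h.symm)
          have hmem2 : (k - a) ∈ L := List.count_pos_iff.mp hpos
          have hka : (k : Int) - a ≠ 0 := by
            have hw : (0 ≤ a ∧ a < k) ∨ (k < a ∧ a ≤ 0) := hfix ▸ pvModWin k a hk
            omega
          have := (H (k - a) hmem2 hka).2
          have hsub : k - (k - a) = a := by ring
          rw [hsub] at this
          rw [List.count_eq_zero.mpr hmem] at this
          omega
    · rw [pvCount_nonfix k a L HL hfix]
      symm
      rw [List.count_eq_zero]
      intro hmem
      rcases List.mem_map.mp hmem with ⟨x, _, hxa⟩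
      exact hfix (hxa ▸ pvInv_fix k x hk)
  · intro Hc r hr h0
    have hfix := HL r hr
    have h1 : L.count r = L.count (pvInv k r) := by
      rw [Hc r, pvCount_map_inv k r L hk HL hfix]
    rw [pvInv_eq k r hk hfix h0] at h1
    have hpos : 0 < L.count r := List.count_pos_iff.mpr hr
    exact ⟨List.count_pos_iff.mp (by omega), h1⟩

-- A's build loop is Counter(residues)
theorem pvStep (d : PySem.Dict Int Int) (r : Int) :
    (if d.contains r then d.modify r 0 (· + 1) else d.insert r 1) = d.modify r 0 (· + 1) := by
  by_cases h : d.contains r = true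
  · simp [h]
  · have hnone : d.get? r = none := by
      rcases hg : d.get? r with _ | v
      · rfl
      · exact absurd (PySem.Dict.contains_eq_isSome_get? d r ▸ (by simp [hg])) h
    simp [h, PySem.Dict.modify, PySem.Dict.getD, hnone]

theorem pvBuild (nums : List Int) (k : Int) :
    nums.foldl (fun d num =>
        let r := PySem.Int.mod num k
        if d.contains r then d.modify r 0 (· + 1) else d.insert r 1) PySem.Dict.empty =
      PySem.Dict.counter (nums.map (fun x => PySem.Int.mod x k)) := by
  rw [PySem.Dict.counter_eq_foldl, List.foldl_map]
  simp only [pvStep]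

-- ===== VERDICT (by name: the statement is the Claim_ definition above) =====
theorem canPair_spec : Claim_equal_canPair := by
  intro nums k _ hpre
  unfold Spec_canPair canPair canPair_alt
  by_cases hlen : nums.length % 2 = 0
  · rcases hpre with hk | hnil | hodd
    · -- main case: k ≠ 0, even length
      rw [if_neg (by omega : ¬ nums.length % 2 ≠ 0), if_neg (by omega : ¬ nums.length % 2 ≠ 0)]
      rw [pvBuild nums k]
      set L : List Int := nums.map (fun x => PySem.Int.mod x k) with hLdef
      have hL : ∀ r ∈ L, PySem.Int.mod r k = r := by
        intro r hr
        rcases List.mem_map.mp hr with ⟨x, _, hx⟩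
        exact hx ▸ pvMod_fix k x hk
      have hmapneg : nums.map (fun x => PySem.Int.mod (-x) k) = L.map (pvInv k) := by
        rw [hLdef, List.map_map]
        exact List.map_congr_left fun x _ => pvMod_neg k x hk
      have hcnt0 : nums.countP (fun x => PySem.Int.mod x k == 0) = L.count 0 := by
        rw [List.count_eq_countP, hLdef, List.countP_map]; rfl
      rw [hmapneg, hcnt0]
      rw [Bool.eq_iff_iff]
      simp only [PySem.Dict.items_counter, PySem.Dict.contains_counter, PySem.Dict.getD_counter,
        List.all_eq_true, List.forall_mem_map, PySem.Set.mem_ofList, ne_eq, ite_not,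
        List.contains_iff_mem]
      simp only [PySem.List.sorted_id_eq_sorted_id_iff_perm]
      constructor
      · intro H
        have hpair : ∀ r ∈ L, r ≠ 0 → ((k - r) ∈ L ∧ L.count r = L.count (k - r)) := by
          intro r hr h0
          have hH := H r hr
          rw [if_neg h0] at hH
          by_cases hm : (k - r) ∈ L
          · rw [if_pos hm] at hH
            exact ⟨hm, by exact_mod_cast (by simpa using hH : ((L.count r : Int) = L.count (k - r)))⟩
          · rw [if_neg hm] at hH
            simp at hH
        rw [if_pos ((pvMain k L hk hL).mp hpair)]
        by_cases h0 : (0 : Int) ∈ L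
        · have hH := H 0 h0
          rwa [if_pos rfl] at hH
        · rw [List.count_eq_zero.mpr h0]
          simp
      · intro H r hr
        by_cases hperm : L.Perm (List.map (pvInv k) L)
        · rw [if_pos hperm] at H
          by_cases h0 : r = 0
          · subst h0
            rwa [if_pos rfl]
          · rw [if_neg h0]
            obtain ⟨hm, hc⟩ := (pvMain k L hk hL).mpr hperm r hr h0
            rw [if_pos hm, hc]
            simp
        · rw [if_neg hperm] at H
          exact absurd H (by simp)
    · subst hnil
      simp [PySem.Dict.empty]
    · omega
  · simp [hlen]
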